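-- pv_equiv track=rewrite | github.com/samuller/genuml | genuml/genuml.py | split_indices_exclude
-- ===== SOURCE A (Python) =====
-- from typing import Optional, List, Dict, Tuple, Any, cast
--
-- def split_indices_exclude(string: str, splits: List[int]) -> List[str]:
--     """Split string at indices, and also exclude characters at each index."""
--     if len(splits) == 0:
--         return [string]
--     parts = [string[0:splits[0]]]
--     for idx, spl in enumerate(splits):
--         if idx == 0:
--             continue
--         beg = splits[idx-1]+1
--         end = spl
--         parts.append(string[beg:end])
--     parts.append(string[splits[-1]+1:])
--     return parts
-- ===== SOURCE B (Python) =====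
-- def split_indices_exclude(string, splits):
--     """Split string at indices, and also exclude characters at each index."""
--     # Walk the split indices RIGHT-TO-LEFT, carrying the current right boundary
--     # `end` (None = open end), emit segments back-to-front, then reverse once.
--     parts = []
--     end = None
--     for s in reversed(splits):
--         parts.append(string[s + 1:end])
--         end = s
--     parts.append(string[:end])
--     parts.reverse()
--     return parts
-- ===== Notes on version B (the rewrite author's own statement) =====
-- stated objective: simpler
-- what changed: Replaces A's three special-cased forward computations (head slice, enumerate loop skipping idx 0 with splits[idx-1] lookups, trailing slice) by a single right-to-left pass that carries only the current right boundary `end`, emits segments back-to-front and reverses once.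
import Mathlib
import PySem

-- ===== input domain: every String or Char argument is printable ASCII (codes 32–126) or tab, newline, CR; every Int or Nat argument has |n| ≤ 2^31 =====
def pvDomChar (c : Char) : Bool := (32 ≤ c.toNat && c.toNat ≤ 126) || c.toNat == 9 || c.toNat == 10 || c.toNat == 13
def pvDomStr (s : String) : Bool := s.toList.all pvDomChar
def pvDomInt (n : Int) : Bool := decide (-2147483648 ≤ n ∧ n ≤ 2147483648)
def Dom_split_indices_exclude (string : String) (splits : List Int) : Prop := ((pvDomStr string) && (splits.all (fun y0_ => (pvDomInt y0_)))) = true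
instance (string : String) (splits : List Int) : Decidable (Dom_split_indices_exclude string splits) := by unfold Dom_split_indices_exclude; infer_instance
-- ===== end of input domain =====

-- B walks the split indices right-to-left carrying the current right boundary `end`
-- (None = open end), emits segments back-to-front and reverses once; objective:
-- simpler (one uniform loop, no index arithmetic or first/last special cases).

-- ===== PORT A =====
def split_indices_exclude (string : String) (splits : List Int) : List String :=
  match splits with
  | [] => [string]                                        -- if len(splits) == 0: return [string]
  | s0 :: _ =>
    let parts := [PySem.Str.slice string (some 0) (some s0)]     -- parts = [string[0:splits[0]]]
    let parts := (PySem.List.enumerate splits 0).foldl           -- for idx, spl in enumerate(splits):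
      (fun parts p =>
        if p.1 == 0 then parts                                   --   if idx == 0: continue
        else parts ++ [PySem.Str.slice string
          (some (PySem.List.pyGetD splits (p.1 - 1) 0 + 1))      --   beg = splits[idx-1]+1
          (some p.2)])                                           --   parts.append(string[beg:spl])
      parts
    parts ++ [PySem.Str.slice string
      (some (PySem.List.pyGetD splits (-1) 0 + 1)) none]         -- parts.append(string[splits[-1]+1:])

-- ===== PORT B =====
def split_indices_exclude_alt (string : String) (splits : List Int) : List String :=
  let st := splits.reverse.foldl                               -- for s in reversed(splits):
    (fun (st : List String × Option Int) s =>
      (st.1 ++ [PySem.Str.slice string (some (s + 1)) st.2],   --   parts.append(string[s+1:end])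
       some s))                                                --   end = s
    ([], none)                                                 -- parts = []; end = None
  (st.1 ++ [PySem.Str.slice string none st.2]).reverse         -- parts.append(string[:end]); parts.reverse()

-- ===== PRECONDITION & SPEC =====
def Spec_split_indices_exclude (string : String) (splits : List Int) (out : List String) : Prop := out = split_indices_exclude_alt string splits
instance (string : String) (splits : List Int) (out : List String) : Decidable (Spec_split_indices_exclude string splits out) := by unfold Spec_split_indices_exclude; infer_instance

-- ===== CLAIM (what is proved, stated in full; the proofs are below) =====
def Claim_equal_split_indices_exclude : Prop := ∀ (string : String) (splits : List Int), Dom_split_indices_exclude string splits → Spec_split_indices_exclude string splits (split_indices_exclude string splits)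

-- ===== LEMMAS AND PROOFS =====

-- string[:None] = string
theorem pv_str_slice_all (s : String) : PySem.Str.slice s none none = s := by
  unfold PySem.Str.slice PySem.Chars.slice
  rw [PySem.List.slice_none_none, String.ofList_toList]

-- splits[-1] of a nonempty list is its last element
theorem pv_pyGetD_neg_one (x : Int) (xs : List Int) :
    PySem.List.pyGetD (x :: xs) (-1) 0 = (x :: xs).getLast (by simp) := by
  unfold PySem.List.pyGetD PySem.List.pyGet? PySem.List.pyIdx?
  have h : -(((x :: xs).length : Int)) ≤ -1 := by simp
  simp [List.getLast_eq_getElem]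
  rfl

-- A's loop, run over the suffix `post` of `splits = pre ++ post` starting at index
-- pre.length ≥ 1, appends exactly the slices over adjacent pairs (prev, cur).
theorem pv_loopA (string : String) (splits : List Int) :
    ∀ (post pre : List Int) (hpre : pre ≠ []) (_hsp : splits = pre ++ post) (acc : List String),
    (PySem.List.enumerate post (pre.length : Int)).foldl
      (fun parts p =>
        if p.1 == 0 then parts
        else parts ++ [PySem.Str.slice string
          (some (PySem.List.pyGetD splits (p.1 - 1) 0 + 1)) (some p.2)]) acc
    = acc ++ ((pre.getLast hpre :: post).zip post).map
        (fun p => PySem.Str.slice string (some (p.1 + 1)) (some p.2)) := by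
  intro post
  induction post with
  | nil => intro pre hpre _ acc; simp [PySem.List.enumerate]
  | cons p ps ih =>
    intro pre hpre hsp acc
    rw [PySem.List.enumerate_cons]
    have hne : (((pre.length : Int)) == 0) = false := by
      have : pre.length ≠ 0 := by simpa using hpre
      simp; omega
    have hget : PySem.List.pyGetD splits ((pre.length : Int) - 1) 0 = pre.getLast hpre := by
      have hlen1 : 1 ≤ pre.length := Nat.one_le_iff_ne_zero.mpr (by simpa using hpre)
      have hcast : ((pre.length : Int) - 1) = ((pre.length - 1 : Nat) : Int) := by omega
      rw [hcast, PySem.List.pyGetD_natCast]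
      have hlt : pre.length - 1 < splits.length := by
        subst hsp; simp; omega
      rw [List.getD_eq_getElem _ _ hlt]
      subst hsp
      rw [List.getElem_append_left (by omega), List.getLast_eq_getElem]
    simp only [List.foldl_cons, hne, if_neg, Bool.false_eq_true, not_false_iff, hget]
    have hlen' : ((pre.length : Int) + 1) = ((pre ++ [p]).length : Int) := by simp
    rw [hlen', ih (pre ++ [p]) (by simp) (by simp [hsp]) _]
    simp

-- adjacent pairs of (s0 :: rest ++ [L]) split into the pairs of (s0 :: rest) plus the final pair
theorem pv_zip_adj (g : Int × Int → String) :
    ∀ (rest : List Int) (s0 L : Int),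
    ((s0 :: (rest ++ [L])).zip (rest ++ [L])).map g
    = (((s0 :: rest).zip rest).map g) ++ [g ((s0 :: rest).getLast (by simp), L)] := by
  intro rest
  induction rest with
  | nil => intro s0 L; simp
  | cons r rs ih =>
    intro s0 L
    simp only [List.cons_append, List.zip_cons_cons, List.map_cons, ih r L]
    simp [List.getLast]

-- the segments B's reversed loop emits, in emission (back-to-front) order
def pvRevSlices (string : String) : List Int → Option Int → List String
  | [], _ => []
  | x :: xs, e => PySem.Str.slice string (some (x + 1)) e :: pvRevSlices string xs (some x)

-- characterization of B's foldl
theorem pv_foldB (string : String) :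
    ∀ (l : List Int) (acc : List String) (e : Option Int),
    l.foldl (fun (st : List String × Option Int) s =>
        (st.1 ++ [PySem.Str.slice string (some (s + 1)) st.2], some s)) (acc, e)
    = (acc ++ pvRevSlices string l e, l.getLast?.or e) := by
  intro l
  induction l with
  | nil => intro acc e; simp [pvRevSlices]
  | cons x xs ih =>
    intro acc e
    simp only [List.foldl_cons]
    rw [ih]
    cases xs with
    | nil => simp [pvRevSlices]
    | cons y ys =>
      have h : (y :: ys).getLast? = some ((y :: ys).getLast (by simp)) :=
        List.getLast?_eq_some_getLast (by simp)
      simp [pvRevSlices, h, Option.or]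

-- reversing the emitted segments yields the forward adjacent-pair slices plus the final slice
theorem pv_revSlices_reverse (string : String) :
    ∀ (l : List Int) (e : Option Int),
    (pvRevSlices string l.reverse e).reverse
    = ((l.zip l.tail).map (fun p => PySem.Str.slice string (some (p.1 + 1)) (some p.2)))
      ++ (match l with
          | [] => []
          | x :: xs => [PySem.Str.slice string (some ((x :: xs).getLast (by simp) + 1)) e]) := by
  intro l
  induction l using List.reverseRecOn with
  | nil => intro e; simp [pvRevSlices]
  | append_singleton l x ih =>
    intro e
    rw [List.reverse_append]
    simp only [List.reverse_cons, List.reverse_nil, List.nil_append, List.singleton_append]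
    show (pvRevSlices string (x :: l.reverse) e).reverse = _
    rw [show pvRevSlices string (x :: l.reverse) e
          = PySem.Str.slice string (some (x + 1)) e :: pvRevSlices string l.reverse (some x) from rfl]
    rw [List.reverse_cons, ih (some x)]
    cases l with
    | nil => simp
    | cons s0 rest =>
      simp only [List.tail_cons, List.cons_append]
      rw [pv_zip_adj (fun p => PySem.Str.slice string (some (p.1 + 1)) (some p.2)) rest s0 x]
      simp

theorem split_indices_exclude_spec' (string : String) (splits : List Int) :
    split_indices_exclude string splits = split_indices_exclude_alt string splits := by
  unfold split_indices_exclude_alt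
  rw [pv_foldB]
  cases splits with
  | nil =>
    show [string] = ([] ++ pvRevSlices string [] none ++
      [PySem.Str.slice string none (List.getLast? ([] : List Int) |>.or none)]).reverse
    simp [pvRevSlices, pv_str_slice_all]
  | cons s0 rest =>
    simp only [List.nil_append, List.reverse_append, List.reverse_cons, List.reverse_nil,
      List.nil_append, List.singleton_append]
    rw [List.getLast?_concat]
    rw [show (Option.or (some s0) none) = some s0 from rfl]
    rw [← List.reverse_cons, pv_revSlices_reverse]
    -- A side
    simp only [split_indices_exclude]
    rw [PySem.List.enumerate_cons]
    simp only [List.foldl_cons]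
    rw [show ((0 : Int) == 0) = true from rfl]
    simp only [if_pos]
    have h1 : ((0 : Int) + 1) = (([s0] : List Int).length : Int) := by simp
    rw [h1, pv_loopA string (s0 :: rest) rest [s0] (by simp) (by simp) _]
    rw [pv_pyGetD_neg_one]
    simp [PySem.List.slice_zero_start, PySem.Str.slice]

-- ===== VERDICT (by name: the statement is the Claim_ definition above) =====
theorem split_indices_exclude_spec : Claim_equal_split_indices_exclude := by
  intro string splits _
  exact split_indices_exclude_spec' string splits
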